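-- pv_equiv track=rewrite | github.com/d3adp0rt/PlanetRedactor | PlanetGenerator.py | _classify_water_bodies
-- ===== SOURCE A (Python) =====
-- def _classify_water_bodies(water_bodies, water_params):
--     classified = {'oceans': [], 'seas': [], 'lakes': [], 'ponds': []}
--     for body in water_bodies:
--         size = len(body)
--         if size >= 20:
--             classified['oceans'].append(body)
--         elif size >= 8:
--             classified['seas'].append(body)
--         elif size >= 3:
--             classified['lakes'].append(body)
--         else:
--             classified['ponds'].append(body)
--     return classified
-- ===== SOURCE B (Python) =====
-- def _classify_water_bodies(water_bodies, water_params):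
--     return {
--         'oceans': [b for b in water_bodies if len(b) >= 20],
--         'seas':   [b for b in water_bodies if 8 <= len(b) < 20],
--         'lakes':  [b for b in water_bodies if 3 <= len(b) < 8],
--         'ponds':  [b for b in water_bodies if len(b) < 3],
--     }
-- ===== Notes on version B (the rewrite author's own statement) =====
-- stated objective: idiomatic
-- what changed: Replaces the single-pass if/elif bucketing loop with a directly-built dict of four independent filter passes (one comprehension per size band), removing the mutable accumulator entirely.
import Mathlib
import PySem

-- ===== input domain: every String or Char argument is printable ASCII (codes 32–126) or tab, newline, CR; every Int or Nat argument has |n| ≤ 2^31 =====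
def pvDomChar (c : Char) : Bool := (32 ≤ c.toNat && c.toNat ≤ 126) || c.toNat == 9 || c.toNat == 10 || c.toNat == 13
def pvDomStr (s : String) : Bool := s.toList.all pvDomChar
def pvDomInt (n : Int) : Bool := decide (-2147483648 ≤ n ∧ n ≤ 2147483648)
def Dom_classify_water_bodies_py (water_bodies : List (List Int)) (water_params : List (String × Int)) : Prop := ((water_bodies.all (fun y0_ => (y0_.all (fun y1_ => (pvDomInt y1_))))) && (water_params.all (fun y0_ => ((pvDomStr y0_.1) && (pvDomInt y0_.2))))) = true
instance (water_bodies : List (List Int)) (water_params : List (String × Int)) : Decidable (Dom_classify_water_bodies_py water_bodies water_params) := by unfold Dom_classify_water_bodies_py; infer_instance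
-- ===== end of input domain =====

-- B builds the dict directly from four independent filter passes (one per size band)
-- instead of A's single mutating bucketing loop; same cost, plainer structure.
-- water_params is unused by both programs (as in the Python source).

-- ===== PORT A =====
def classify_water_bodies_py (water_bodies : List (List Int)) (water_params : List (String × Int)) : List (String × List (List Int)) :=
  (water_bodies.foldl
    (fun classified body =>
      let size : Int := (body.length : Int)
      if size ≥ 20 then classified.modify "oceans" [] (· ++ [body])
      else if size ≥ 8 then classified.modify "seas" [] (· ++ [body])
      else if size ≥ 3 then classified.modify "lakes" [] (· ++ [body])
      else classified.modify "ponds" [] (· ++ [body]))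
    (PySem.Dict.ofList [("oceans", []), ("seas", []), ("lakes", []), ("ponds", [])])).items

-- ===== PORT B =====
def classify_water_bodies_py_alt (water_bodies : List (List Int)) (water_params : List (String × Int)) : List (String × List (List Int)) :=
  [("oceans", water_bodies.filter (fun b => decide (20 ≤ (b.length : Int)))),
   ("seas",   water_bodies.filter (fun b => decide (8 ≤ (b.length : Int) ∧ (b.length : Int) < 20))),
   ("lakes",  water_bodies.filter (fun b => decide (3 ≤ (b.length : Int) ∧ (b.length : Int) < 8))),
   ("ponds",  water_bodies.filter (fun b => decide ((b.length : Int) < 3)))]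

-- ===== PRECONDITION & SPEC =====
def Spec_classify_water_bodies_py (water_bodies : List (List Int)) (water_params : List (String × Int)) (out : List (String × List (List Int))) : Prop := out = classify_water_bodies_py_alt water_bodies water_params
instance (water_bodies : List (List Int)) (water_params : List (String × Int)) (out : List (String × List (List Int))) : Decidable (Spec_classify_water_bodies_py water_bodies water_params out) := by unfold Spec_classify_water_bodies_py; infer_instance

-- ===== CLAIM (what is proved, stated in full; the proofs are below) =====
def Claim_equal_classify_water_bodies_py : Prop := ∀ (water_bodies : List (List Int)) (water_params : List (String × Int)), Dom_classify_water_bodies_py water_bodies water_params → Spec_classify_water_bodies_py water_bodies water_params (classify_water_bodies_py water_bodies water_params)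

-- ===== LEMMAS AND PROOFS =====

-- Loop invariant for A's fold: starting from symbolic buckets o/s/l/p, the final dict
-- items are those buckets each extended by the corresponding size-band filter of the
-- remaining bodies — exactly B's four-pass decomposition.
theorem pv_fold_inv (wb : List (List Int)) (o s l p : List (List Int)) :
    (wb.foldl
      (fun classified body =>
        let size : Int := (body.length : Int)
        if size ≥ 20 then classified.modify "oceans" [] (· ++ [body])
        else if size ≥ 8 then classified.modify "seas" [] (· ++ [body])
        else if size ≥ 3 then classified.modify "lakes" [] (· ++ [body])
        else classified.modify "ponds" [] (· ++ [body]))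
      (PySem.Dict.ofList [("oceans", o), ("seas", s), ("lakes", l), ("ponds", p)])).items
    = [("oceans", o ++ wb.filter (fun b => decide (20 ≤ (b.length : Int)))),
       ("seas",   s ++ wb.filter (fun b => decide (8 ≤ (b.length : Int) ∧ (b.length : Int) < 20))),
       ("lakes",  l ++ wb.filter (fun b => decide (3 ≤ (b.length : Int) ∧ (b.length : Int) < 8))),
       ("ponds",  p ++ wb.filter (fun b => decide ((b.length : Int) < 3)))] := by
  induction wb generalizing o s l p with
  | nil =>
    simp [PySem.Dict.ofList, PySem.Dict.update, PySem.Dict.empty, PySem.Dict.insert]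
  | cons b wb ih =>
    rw [List.foldl_cons]
    simp only []
    by_cases h20 : (20 : Int) ≤ (b.length : Int)
    · rw [if_pos (show ((b.length : Int)) ≥ 20 from h20)]
      rw [show (PySem.Dict.ofList [("oceans", o), ("seas", s), ("lakes", l), ("ponds", p)]).modify
          "oceans" [] (· ++ [b])
          = PySem.Dict.ofList [("oceans", o ++ [b]), ("seas", s), ("lakes", l), ("ponds", p)] from by
        simp [PySem.Dict.modify, PySem.Dict.ofList, PySem.Dict.insert, PySem.Dict.getD,
          PySem.Dict.get?, PySem.Dict.update, PySem.Dict.empty], ih]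
      have h1 : ¬ ((b.length : Int) < 20) := by omega
      simp [List.filter_cons]
      omega
    · rw [if_neg (show ¬ ((b.length : Int)) ≥ 20 from h20)]
      by_cases h8 : (8 : Int) ≤ (b.length : Int)
      · rw [if_pos (show ((b.length : Int)) ≥ 8 from h8)]
        rw [show (PySem.Dict.ofList [("oceans", o), ("seas", s), ("lakes", l), ("ponds", p)]).modify
            "seas" [] (· ++ [b])
            = PySem.Dict.ofList [("oceans", o), ("seas", s ++ [b]), ("lakes", l), ("ponds", p)] from by
          simp [PySem.Dict.modify, PySem.Dict.ofList, PySem.Dict.insert, PySem.Dict.getD,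
            PySem.Dict.get?, PySem.Dict.update, PySem.Dict.empty], ih]
        have h1 : (b.length : Int) < 20 := by omega
        have h2 : ¬ ((b.length : Int) < 8) := by omega
        have h3 : ¬ ((b.length : Int) < 3) := by omega
        simp [List.filter_cons]
        omega
      · rw [if_neg (show ¬ ((b.length : Int)) ≥ 8 from h8)]
        by_cases h3 : (3 : Int) ≤ (b.length : Int)
        · rw [if_pos (show ((b.length : Int)) ≥ 3 from h3)]
          rw [show (PySem.Dict.ofList [("oceans", o), ("seas", s), ("lakes", l), ("ponds", p)]).modify
              "lakes" [] (· ++ [b])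
              = PySem.Dict.ofList [("oceans", o), ("seas", s), ("lakes", l ++ [b]), ("ponds", p)] from by
            simp [PySem.Dict.modify, PySem.Dict.ofList, PySem.Dict.insert, PySem.Dict.getD,
              PySem.Dict.get?, PySem.Dict.update, PySem.Dict.empty], ih]
          have h1 : (b.length : Int) < 8 := by omega
          have h2 : ¬ ((b.length : Int) < 3) := by omega
          simp [List.filter_cons]
          omega
        · rw [if_neg (show ¬ ((b.length : Int)) ≥ 3 from h3)]
          rw [show (PySem.Dict.ofList [("oceans", o), ("seas", s), ("lakes", l), ("ponds", p)]).modify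
              "ponds" [] (· ++ [b])
              = PySem.Dict.ofList [("oceans", o), ("seas", s), ("lakes", l), ("ponds", p ++ [b])] from by
            simp [PySem.Dict.modify, PySem.Dict.ofList, PySem.Dict.insert, PySem.Dict.getD,
              PySem.Dict.get?, PySem.Dict.update, PySem.Dict.empty], ih]
          have h1 : (b.length : Int) < 3 := by omega
          simp [List.filter_cons]
          omega

-- ===== VERDICT (by name: the statement is the Claim_ definition above) =====
theorem classify_water_bodies_py_spec : Claim_equal_classify_water_bodies_py := by
  intro water_bodies water_params _
  show _ = _
  unfold classify_water_bodies_py classify_water_bodies_py_alt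
  simpa using pv_fold_inv water_bodies [] [] [] []
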